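-- pv_equiv track=rewrite | github.com/t-ding/CellAnalysis | find_percent_stained.py | count_black
-- ===== SOURCE A (Python) =====
-- def is_black(a, n):
-- 	if a[1] < n:
-- 		return True
-- 	return False
--
-- def count_black(image, thresh=110):
-- 	not_black = 0
-- 	black = 0
-- 	for row in image:
-- 		for pixel in row:
-- 			if is_black(pixel, thresh):
-- 				black += 1
-- 			else:
-- 				not_black += 1
-- 	return [not_black, black]
-- ===== SOURCE B (Python) =====
-- def count_black(image, thresh=110):
-- 	vals = sorted(px[1] for row in image for px in row)
-- 	lo, hi = 0, len(vals)
-- 	while lo < hi: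
-- 		mid = (lo + hi) // 2
-- 		if vals[mid] < thresh:
-- 			lo = mid + 1
-- 		else:
-- 			hi = mid
-- 	return [len(vals) - lo, lo]
-- ===== Notes on version B (the rewrite author's own statement) =====
-- stated objective: alternative
-- what changed: Replaces A's two-counter lockstep scan with a staged algorithm: collect and sort all pixels' second components, then locate the threshold's insertion point by a hand-written binary search; the black count is that position and not_black is the remaining length.
-- outside the precondition, e.g. on count_black([[[5]]], 110): A raises IndexError, B raises IndexError
import Mathlib
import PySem

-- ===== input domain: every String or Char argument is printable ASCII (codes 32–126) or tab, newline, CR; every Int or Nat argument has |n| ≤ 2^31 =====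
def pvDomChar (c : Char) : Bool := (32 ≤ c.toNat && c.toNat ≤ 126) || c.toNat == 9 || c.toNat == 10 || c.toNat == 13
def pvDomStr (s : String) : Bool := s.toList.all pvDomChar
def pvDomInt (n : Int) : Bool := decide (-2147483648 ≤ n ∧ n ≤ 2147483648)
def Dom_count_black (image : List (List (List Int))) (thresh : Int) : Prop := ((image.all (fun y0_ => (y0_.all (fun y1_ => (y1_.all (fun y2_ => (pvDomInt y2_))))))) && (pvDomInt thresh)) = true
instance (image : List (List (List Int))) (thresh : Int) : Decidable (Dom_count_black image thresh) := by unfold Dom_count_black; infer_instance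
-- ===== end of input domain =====

-- B replaces A's two-counter lockstep scan by a staged algorithm: sort all pixels'
-- second components, binary-search the threshold position; objective: alternative.


-- ===== PORT A =====
-- is_black(a, n): a[1] < n (pyGet? is exact; Pre_ guarantees the index is in range,
-- so the .getD 0 default is never reached on admitted inputs)
def is_black (a : List Int) (n : Int) : Bool :=
  if (PySem.List.pyGet? a 1).getD 0 < n then true else false

def count_black (image : List (List (List Int))) (thresh : Int) : List Int :=
  let s := image.foldl (fun s row =>
    row.foldl (fun (s : Int × Int) pixel =>
      if is_black pixel thresh then (s.1, s.2 + 1) else (s.1 + 1, s.2)) s) (0, 0)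
  [s.1, s.2]

-- ===== PORT B =====
-- the while lo < hi binary-search loop of Source B; terminates since hi - lo shrinks
def bsLoop (vals : List Int) (thresh : Int) (lo hi : Int) : Int :=
  if h : lo < hi then
    let mid := PySem.Int.floordiv (lo + hi) 2
    if (PySem.List.pyGet? vals mid).getD 0 < thresh then
      bsLoop vals thresh (mid + 1) hi
    else
      bsLoop vals thresh lo mid
  else lo
termination_by (hi - lo).toNat
decreasing_by
  · have := PySem.Int.floordiv_two_mid_bounds (le_of_lt h)
    omega
  · have h2 : PySem.Int.floordiv (lo + hi) 2 < hi := by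
      rw [PySem.Int.floordiv_lt_iff_lt_mul (by omega : (0:Int) < 2)]
      omega
    have := PySem.Int.floordiv_two_mid_bounds (le_of_lt h)
    omega

def count_black_alt (image : List (List (List Int))) (thresh : Int) : List Int :=
  let vals := PySem.List.sorted
    ((image.flatMap (fun row => row)).map (fun px => (PySem.List.pyGet? px 1).getD 0))
    (fun x => x) false
  let lo := bsLoop vals thresh 0 (vals.length : Int)
  [(vals.length : Int) - lo, lo]

-- ===== PRECONDITION & SPEC =====
-- Pre_ excludes images containing a pixel with fewer than 2 components, on which A (and B)
-- raise IndexError at the a[1] / px[1] access.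
def Pre_count_black (image : List (List (List Int))) (thresh : Int) : Prop :=
  ∀ row ∈ image, ∀ px ∈ row, 2 ≤ px.length
instance (image : List (List (List Int))) (thresh : Int) : Decidable (Pre_count_black image thresh) := by unfold Pre_count_black; infer_instance
def pvWitness_count_black : List (List (List Int)) × Int := ([[[1, 2], [3, 200]], [[0, 5]]], 110)

def Spec_count_black (image : List (List (List Int))) (thresh : Int) (out : List Int) : Prop := out = count_black_alt image thresh
instance (image : List (List (List Int))) (thresh : Int) (out : List Int) : Decidable (Spec_count_black image thresh out) := by unfold Spec_count_black; infer_instance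

-- ===== CLAIM (what is proved, stated in full; the proofs are below) =====
def Claim_equal_count_black : Prop := ∀ (image : List (List (List Int))) (thresh : Int), Dom_count_black image thresh → Pre_count_black image thresh → Spec_count_black image thresh (count_black image thresh)

-- ===== LEMMAS AND PROOFS =====

def blackP (thresh : Int) (px : List Int) : Bool :=
  (PySem.List.pyGet? px 1).getD 0 < thresh

-- A's inner loop adds the row's per-category counts
theorem row_loop (thresh : Int) (row : List (List Int)) (s : Int × Int) :
    row.foldl (fun (s : Int × Int) pixel =>
      if is_black pixel thresh then (s.1, s.2 + 1) else (s.1 + 1, s.2)) s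
    = (s.1 + (row.countP (fun px => !blackP thresh px) : Int),
       s.2 + (row.countP (blackP thresh) : Int)) := by
  induction row generalizing s with
  | nil => simp
  | cons px rest ih =>
    rw [List.foldl_cons, ih]
    by_cases h : (PySem.List.pyGet? px 1).getD 0 < thresh <;>
      · simp [is_black, blackP, h]
        omega

theorem image_loop (thresh : Int) (image : List (List (List Int))) (s : Int × Int) :
    image.foldl (fun s row =>
      row.foldl (fun (s : Int × Int) pixel =>
        if is_black pixel thresh then (s.1, s.2 + 1) else (s.1 + 1, s.2)) s) s
    = (s.1 + (((image.flatMap (fun row => row)).countP (fun px => !blackP thresh px) : Nat) : Int),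
       s.2 + (((image.flatMap (fun row => row)).countP (blackP thresh) : Nat) : Int)) := by
  induction image generalizing s with
  | nil => simp
  | cons row rest ih =>
    rw [List.foldl_cons, ih, row_loop]
    simp [List.countP_append]
    constructor <;> ring

-- in a nondecreasing list, the elements below t are exactly the first countP of them
theorem idx_lt (t : Int) (l : List Int) (hp : l.Pairwise (· ≤ ·)) :
    ∀ i : Nat, (hi : i < l.length) → (l[i] < t ↔ i < l.countP (fun x => decide (x < t))) := by
  induction l with
  | nil => intro i hi; simp at hi
  | cons a l ih =>
    rw [List.pairwise_cons] at hp
    obtain ⟨ha, hp'⟩ := hp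
    intro i hi
    by_cases hat : a < t
    · cases i with
      | zero => simp [hat]
      | succ j =>
        have hij := ih hp' j (by simpa using hi)
        simp [hat, hij]
    · have hz : l.countP (fun x => decide (x < t)) = 0 := by
        rw [List.countP_eq_zero]
        intro x hx
        have := ha x hx
        simp; omega
      cases i with
      | zero => simp [hat, hz]
      | succ j =>
        have hj : j < l.length := by simpa using hi
        have hmem : l[j] ∈ l := List.getElem_mem hj
        have hax := ha _ hmem
        simp only [List.getElem_cons_succ, List.countP_cons, hat, decide_false, hz]
        constructor
        · intro hlt; omega
        · intro hlt; simp at hlt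

-- binary-search correctness on a sorted list (strong induction on the interval width)
theorem bsLoop_eq (vals : List Int) (t : Int) (hp : vals.Pairwise (· ≤ ·)) :
    ∀ n : Nat, ∀ lo hi : Int, (hi - lo).toNat ≤ n → 0 ≤ lo →
      lo ≤ (vals.countP (fun x => decide (x < t)) : Int) →
      (vals.countP (fun x => decide (x < t)) : Int) ≤ hi → hi ≤ (vals.length : Int) →
      bsLoop vals t lo hi = (vals.countP (fun x => decide (x < t)) : Int) := by
  intro n
  induction n with
  | zero =>
    intro lo hi hn h0 hlc hch hhl
    rw [bsLoop]
    have hnl : ¬ lo < hi := by omega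
    simp only [hnl, dite_false]
    omega
  | succ n ih =>
    intro lo hi hn h0 hlc hch hhl
    rw [bsLoop]
    by_cases h : lo < hi
    · simp only [h, dite_true]
      have hmb := PySem.Int.floordiv_two_mid_bounds (le_of_lt h)
      set mid := PySem.Int.floordiv (lo + hi) 2 with hmdef
      have hms : mid < hi := by
        have : PySem.Int.floordiv (lo + hi) 2 < hi := by
          rw [PySem.Int.floordiv_lt_iff_lt_mul (by omega : (0:Int) < 2)]; omega
        omega
      have hmid0 : 0 ≤ mid := by omega
      have hmlen : mid.toNat < vals.length := by omega
      have hget : PySem.List.pyGet? vals mid = some vals[mid.toNat] := by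
        rw [PySem.List.pyGet?_of_nonneg vals hmid0, List.getElem?_eq_getElem hmlen]
      have hiff := idx_lt t vals hp mid.toNat hmlen
      simp only [hget, Option.getD_some]
      by_cases hlt : vals[mid.toNat] < t
      · simp only [hlt, if_true]
        have hc : mid.toNat < vals.countP (fun x => decide (x < t)) := hiff.mp hlt
        exact ih (mid + 1) hi (by omega) (by omega) (by omega) hch hhl
      · simp only [hlt, if_false]
        have hc : ¬ mid.toNat < vals.countP (fun x => decide (x < t)) :=
          fun hc => hlt (hiff.mpr hc)
        exact ih lo mid (by omega) h0 hlc (by omega) (by omega)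
    · simp only [h, dite_false]
      omega

-- ===== VERDICT (by name: the statement is the Claim_ definition above) =====
theorem count_black_spec : Claim_equal_count_black := by
  intro image thresh _ _
  unfold Spec_count_black count_black count_black_alt
  rw [image_loop]
  set L := (image.flatMap (fun row => row)).map (fun px => (PySem.List.pyGet? px 1).getD 0) with hL
  set vals := PySem.List.sorted L (fun x => x) false with hv
  have hperm : vals.Perm L := PySem.List.sorted_perm L (fun x => x) false
  have hpw : vals.Pairwise (· ≤ ·) := by
    have := PySem.List.sorted_pairwise L (fun x => x)
    simpa [hv] using this
  have hcnt : vals.countP (fun x => decide (x < thresh))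
      = (image.flatMap (fun row => row)).countP (blackP thresh) := by
    rw [hperm.countP_eq, hL, List.countP_map]
    rfl
  have hlen : vals.length = (image.flatMap (fun row => row)).length := by
    rw [hperm.length_eq, hL, List.length_map]
  have hcl : vals.countP (fun x => decide (x < thresh)) ≤ vals.length :=
    List.countP_le_length
  have hbs := bsLoop_eq vals thresh hpw (vals.length) 0 (vals.length : Int)
    (by omega) (le_refl 0) (by exact_mod_cast Int.natCast_nonneg _)
    (by exact_mod_cast hcl) (le_refl _)
  have hsplit : (image.flatMap (fun row => row)).length
      = (image.flatMap (fun row => row)).countP (fun px => !blackP thresh px)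
        + (image.flatMap (fun row => row)).countP (blackP thresh) := by
    have h1 := List.length_eq_countP_add_countP (l := image.flatMap (fun row => row))
      (p := blackP thresh)
    have h2 : (image.flatMap (fun row => row)).countP (fun a => decide ¬(blackP thresh a = true))
        = (image.flatMap (fun row => row)).countP (fun px => !blackP thresh px) := by
      apply List.countP_congr
      intro x _
      simp
    omega
  rw [hlen] at hbs
  simp only [hlen, hbs, hcnt, List.cons.injEq, and_true]
  constructor <;> omega
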